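-- pv_equiv track=rewrite | github.com/yastn/yastn | yast/core/core.py | _leg_structure_merge
-- ===== SOURCE A (Python) =====
-- from itertools import product, groupby
-- from operator import itemgetter
--
-- def _leg_structure_merge(teff, tlegs, Deff, Dlegs):
--     tt = sorted(set(zip(teff, tlegs, Deff, Dlegs)))
--     dec, Dtot = {}, {}
--     for te, grp in groupby(tt, key=itemgetter(0)):
--         Dlow = 0
--         dec[te] = {}
--         for _, tl, De, Dl in grp:
--             Dtop = Dlow + De
--             dec[te][tl] = ((Dlow, Dtop), De, Dl)
--             Dlow = Dtop
--         Dtot[te] = Dtop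
--     return dec, Dtot
-- ===== SOURCE B (Python) =====
-- def _leg_structure_merge(teff, tlegs, Deff, Dlegs):
--     # No groupby and no running accumulator: each block's offset is computed by a
--     # closed-form sum over the strictly smaller triples of its charge's group, and
--     # the group total is a plain sum; dicts are filled per sorted charge.
--     quads = set(zip(teff, tlegs, Deff, Dlegs))
--     dec, Dtot = {}, {}
--     for te in sorted({q[0] for q in quads}):
--         group = {q[1:] for q in quads if q[0] == te}
--         dec[te] = {}
--         for trip in sorted(group):
--             tl, De, Dl = trip
--             low = sum(u[1] for u in group if u < trip)
--             dec[te][tl] = ((low, low + De), De, Dl)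
--         Dtot[te] = sum(u[1] for u in group)
--     return dec, Dtot
-- ===== Notes on version B (the rewrite author's own statement) =====
-- stated objective: alternative
-- what changed: Replaces the global sort + itertools.groupby + running-offset accumulator with per-charge sets and a closed-form computation: each block's lower offset is the sum of De over the strictly smaller triples of its group (no accumulator state), and the group total is a plain sum.
import Mathlib
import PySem

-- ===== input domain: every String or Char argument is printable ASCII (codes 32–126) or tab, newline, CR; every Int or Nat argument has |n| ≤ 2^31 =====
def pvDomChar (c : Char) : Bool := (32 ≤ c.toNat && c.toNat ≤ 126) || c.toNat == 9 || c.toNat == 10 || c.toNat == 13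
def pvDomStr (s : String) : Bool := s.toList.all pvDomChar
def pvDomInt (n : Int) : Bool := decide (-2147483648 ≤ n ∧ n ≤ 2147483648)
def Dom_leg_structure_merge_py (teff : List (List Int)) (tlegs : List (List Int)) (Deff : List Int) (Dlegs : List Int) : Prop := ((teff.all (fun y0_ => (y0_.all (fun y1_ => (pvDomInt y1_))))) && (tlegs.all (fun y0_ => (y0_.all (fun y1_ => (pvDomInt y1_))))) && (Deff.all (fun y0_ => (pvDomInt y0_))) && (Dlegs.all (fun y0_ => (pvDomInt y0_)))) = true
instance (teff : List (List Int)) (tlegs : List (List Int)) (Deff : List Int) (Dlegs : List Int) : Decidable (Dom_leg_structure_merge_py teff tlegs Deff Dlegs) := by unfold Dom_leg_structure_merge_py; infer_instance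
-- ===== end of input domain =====

-- B replaces A's global sort + groupby + running-offset accumulator by per-charge sets
-- where each block's offset is a closed-form sum over the strictly smaller triples
-- (alternative decomposition; no speed claim).


-- a quadruple (te, tl, De, Dl), right-nested, and a triple (tl, De, Dl)
abbrev PVQuad := List Int × List Int × Int × Int
abbrev PVTrip := List Int × Int × Int

-- Python's tuple comparison is lexicographic: encode it with Prod.Lex (Mathlib's
-- plain Prod order is pointwise, not Python's).
def pvKey4 (q : PVQuad) : Lex (List Int × Lex (List Int × Lex (Int × Int))) :=
  toLex (q.1, toLex (q.2.1, toLex (q.2.2.1, q.2.2.2)))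

def pvKey3 (t : PVTrip) : Lex (List Int × Lex (Int × Int)) :=
  toLex (t.1, toLex (t.2.1, t.2.2))

-- ===== PORT A =====
-- itertools.groupby over a list, keyed by the first component: runs of equal keys
def pvGroupRuns (l : List PVQuad) : List (List Int × List PVQuad) :=
  match l with
  | [] => []
  | q :: rest =>
    (q.1, q :: rest.takeWhile (fun r => r.1 == q.1)) :: pvGroupRuns (rest.dropWhile (fun r => r.1 == q.1))
termination_by l.length
decreasing_by
  have := List.length_dropWhile_le (p := fun r => r.1 == q.1) (l := rest)
  simp; omega

def leg_structure_merge_py (teff : List (List Int)) (tlegs : List (List Int)) (Deff : List Int) (Dlegs : List Int) : (List (List Int × List (List Int × (Int × Int) × Int × Int))) × (List (List Int × Int)) :=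
  -- tt = sorted(set(zip(teff, tlegs, Deff, Dlegs)))
  let tt := PySem.List.sorted (PySem.Set.ofList (teff.zip (tlegs.zip (Deff.zip Dlegs)))) pvKey4
  -- for te, grp in groupby(tt, key=itemgetter(0)): inner loop carries (dec[te], Dlow)
  let fin := (pvGroupRuns tt).foldl
    (fun (acc : PySem.Dict (List Int) (List (List Int × (Int × Int) × Int × Int)) × PySem.Dict (List Int) Int) g =>
      let r := g.2.foldl
        (fun (s : PySem.Dict (List Int) ((Int × Int) × Int × Int) × Int) q =>
          (s.1.insert q.2.1 ((s.2, s.2 + q.2.2.1), q.2.2.1, q.2.2.2), s.2 + q.2.2.1))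
        (PySem.Dict.empty, 0)
      (acc.1.insert g.1 r.1.items, acc.2.insert g.1 r.2))
    (PySem.Dict.empty, PySem.Dict.empty)
  (fin.1.items, fin.2.items)

-- ===== PORT B =====
-- sum(u[1] for u in l)
def pvSumDe (l : List PVTrip) : Int := (l.map (fun u => u.2.1)).sum
-- sum(u[1] for u in g if u < t): the closed-form lower offset of t within group g
def pvLow (g : List PVTrip) (t : PVTrip) : Int :=
  pvSumDe (g.filter (fun u => decide (pvKey3 u < pvKey3 t)))

def leg_structure_merge_py_alt (teff : List (List Int)) (tlegs : List (List Int)) (Deff : List Int) (Dlegs : List Int) : (List (List Int × List (List Int × (Int × Int) × Int × Int))) × (List (List Int × Int)) :=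
  -- quads = set(zip(teff, tlegs, Deff, Dlegs))
  let quads := PySem.Set.ofList (teff.zip (tlegs.zip (Deff.zip Dlegs)))
  -- for te in sorted({q[0] for q in quads}):
  let fin := (PySem.List.sorted (PySem.Set.ofList (quads.map Prod.fst)) (fun k => k)).foldl
    (fun (acc : PySem.Dict (List Int) (List (List Int × (Int × Int) × Int × Int)) × PySem.Dict (List Int) Int) te =>
      -- group = {q[1:] for q in quads if q[0] == te}
      let group : List PVTrip := PySem.Set.ofList ((quads.filter (fun q => q.1 == te)).map (fun q => q.2))
      -- for trip in sorted(group): dec[te][tl] = ((low, low + De), De, Dl), low closed-form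
      let d := (PySem.List.sorted group pvKey3).foldl
        (fun (d : PySem.Dict (List Int) ((Int × Int) × Int × Int)) t =>
          d.insert t.1 ((pvLow group t, pvLow group t + t.2.1), t.2.1, t.2.2))
        PySem.Dict.empty
      -- Dtot[te] = sum(u[1] for u in group)
      (acc.1.insert te d.items, acc.2.insert te (pvSumDe group)))
    (PySem.Dict.empty, PySem.Dict.empty)
  (fin.1.items, fin.2.items)

-- ===== PRECONDITION & SPEC =====
def Spec_leg_structure_merge_py (teff : List (List Int)) (tlegs : List (List Int)) (Deff : List Int) (Dlegs : List Int) (out : (List (List Int × List (List Int × (Int × Int) × Int × Int))) × (List (List Int × Int))) : Prop := out = leg_structure_merge_py_alt teff tlegs Deff Dlegs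
instance (teff : List (List Int)) (tlegs : List (List Int)) (Deff : List Int) (Dlegs : List Int) (out : (List (List Int × List (List Int × (Int × Int) × Int × Int))) × (List (List Int × Int))) : Decidable (Spec_leg_structure_merge_py teff tlegs Deff Dlegs out) := by
  unfold Spec_leg_structure_merge_py
  exact @instDecidableEqProd _ _
    (@instDecidableEqList _ (@instDecidableEqProd _ _ _ (@instDecidableEqList _ inferInstance)))
    inferInstance _ _

-- ===== CLAIM (what is proved, stated in full; the proofs are below) =====
def Claim_equal_leg_structure_merge_py : Prop := ∀ (teff : List (List Int)) (tlegs : List (List Int)) (Deff : List Int) (Dlegs : List Int), Dom_leg_structure_merge_py teff tlegs Deff Dlegs → Spec_leg_structure_merge_py teff tlegs Deff Dlegs (leg_structure_merge_py teff tlegs Deff Dlegs)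

-- ===== LEMMAS AND PROOFS =====

theorem pvKey4_injective : Function.Injective pvKey4 := by
  intro a b h
  simp [pvKey4, Prod.ext_iff] at h
  obtain ⟨h1, h2, h3, h4⟩ := h
  exact Prod.ext h1 (Prod.ext h2 (Prod.ext h3 h4))

theorem pvKey3_injective : Function.Injective pvKey3 := by
  intro a b h
  simp [pvKey3, Prod.ext_iff] at h
  obtain ⟨h1, h2, h3⟩ := h
  exact Prod.ext h1 (Prod.ext h2 h3)

theorem pvKey4_lt_fst_le {a b : PVQuad} (h : pvKey4 a < pvKey4 b) : a.1 ≤ b.1 := by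
  have h' := Prod.Lex.lt_iff.1 h
  simp only [pvKey4, ofLex_toLex] at h'
  rcases h' with h1 | ⟨h1, _⟩
  · exact le_of_lt h1
  · exact le_of_eq h1

theorem pvKey4_lt_key3 {te : List Int} {t t' : PVTrip}
    (h : pvKey4 (te, t) < pvKey4 (te, t')) : pvKey3 t < pvKey3 t' := by
  have h' := Prod.Lex.lt_iff.1 h
  simp only [pvKey4, ofLex_toLex] at h'
  rcases h' with h1 | ⟨_, h2⟩
  · exact absurd h1 (lt_irrefl _)
  · exact h2

theorem pvGroupRuns_cons (q : PVQuad) (rest : List PVQuad) :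
    pvGroupRuns (q :: rest)
      = (q.1, q :: rest.takeWhile (fun r => r.1 == q.1))
          :: pvGroupRuns (rest.dropWhile (fun r => r.1 == q.1)) := by
  rw [pvGroupRuns]

-- groupby over a list whose first components are non-decreasing, described by an
-- explicit strictly sorted key list K
theorem pvGroupRuns_eq (K : List (List Int)) (s : List PVQuad)
    (hK : K.Pairwise (· < ·))
    (hs : s.Pairwise (fun a b => a.1 ≤ b.1))
    (hmem : ∀ k, k ∈ K ↔ k ∈ s.map (·.1)) :
    pvGroupRuns s = K.map (fun te => (te, s.filter (fun r => r.1 == te))) := by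
  induction s using pvGroupRuns.induct generalizing K with
  | case1 =>
    have hKnil : K = [] := by
      apply List.eq_nil_iff_forall_not_mem.2
      intro k hk
      simpa using (hmem k).1 hk
    simp [hKnil, pvGroupRuns]
  | case2 q rest ih =>
    set p : PVQuad → Bool := fun r => r.1 == q.1 with hp
    have hsplit : rest = rest.takeWhile p ++ rest.dropWhile p := (List.takeWhile_append_dropWhile).symm
    have htake : ∀ x ∈ rest.takeWhile p, x.1 = q.1 := by
      intro x hx
      have := List.mem_takeWhile_imp hx
      simpa [hp] using this
    have hmin : ∀ x ∈ rest, q.1 ≤ x.1 := by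
      intro x hx
      exact (List.pairwise_cons.1 hs).1 x hx
    -- every element of the drop part has first component strictly greater than q.1
    have hdrop : ∀ x ∈ rest.dropWhile p, q.1 < x.1 := by
      intro x hx
      cases hd : rest.dropWhile p with
      | nil => rw [hd] at hx; simp at hx
      | cons d0 ds =>
        have hd0ne : ¬ (p d0 = true) := by
          have := List.head?_dropWhile_not p rest
          rw [hd] at this; simpa using this
        have hd0ne' : d0.1 ≠ q.1 := by simpa [hp] using hd0ne
        have hd0mem : d0 ∈ rest := (List.dropWhile_sublist p).subset (by rw [hd]; exact List.mem_cons_self ..)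
        have hq0 : q.1 < d0.1 := lt_of_le_of_ne (hmin d0 hd0mem) (Ne.symm hd0ne')
        rw [hd] at hx
        rcases List.mem_cons.1 hx with rfl | hx'
        · exact hq0
        · have hpw : (rest.dropWhile p).Pairwise (fun a b => a.1 ≤ b.1) :=
            ((List.pairwise_cons.1 hs).2).sublist (List.dropWhile_sublist p)
          rw [hd] at hpw
          exact lt_of_lt_of_le hq0 ((List.pairwise_cons.1 hpw).1 x hx')
    -- K = q.1 :: K'
    have hq1K : q.1 ∈ K := (hmem q.1).2 (List.mem_map_of_mem (List.mem_cons_self ..))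
    obtain ⟨k0, K', rfl⟩ : ∃ k0 K', K = k0 :: K' := by
      cases K with
      | nil => simp at hq1K
      | cons a b => exact ⟨a, b, rfl⟩
    have hk0 : k0 = q.1 := by
      rcases List.mem_cons.1 hq1K with h | h
      · exact h.symm
      · have hk0mem : k0 ∈ (q :: rest).map (·.1) := (hmem k0).1 (List.mem_cons_self ..)
        have hle : q.1 ≤ k0 := by
          rcases List.mem_map.1 hk0mem with ⟨x, hx, rfl⟩
          rcases List.mem_cons.1 hx with rfl | hx'
          · exact le_refl _
          · exact hmin x hx'
        have := (List.pairwise_cons.1 hK).1 q.1 h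
        exact absurd (lt_of_le_of_lt hle this) (lt_irrefl _)
    subst hk0
    -- membership condition for the tail keys
    have hmem' : ∀ k, k ∈ K' ↔ k ∈ (rest.dropWhile p).map (·.1) := by
      intro k
      constructor
      · intro hk
        have hkgt : q.1 < k := (List.pairwise_cons.1 hK).1 k hk
        have hkm : k ∈ (q :: rest).map (·.1) := (hmem k).1 (List.mem_cons_of_mem _ hk)
        rcases List.mem_map.1 hkm with ⟨x, hx, rfl⟩
        rcases List.mem_cons.1 hx with rfl | hx'
        · exact absurd hkgt (lt_irrefl _)
        · rw [hsplit] at hx'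
          rcases List.mem_append.1 hx' with h1 | h2
          · exact absurd (htake x h1 ▸ hkgt) (lt_irrefl _)
          · exact List.mem_map_of_mem h2
      · intro hk
        rcases List.mem_map.1 hk with ⟨x, hx, rfl⟩
        have hxr : x ∈ rest := (List.dropWhile_sublist p).subset hx
        have hin : x.1 ∈ q.1 :: K' := (hmem x.1).2 (List.mem_map_of_mem (List.mem_cons_of_mem _ hxr))
        rcases List.mem_cons.1 hin with h | h
        · exact absurd (h ▸ hdrop x hx) (lt_irrefl _)
        · exact h
    have ihK : pvGroupRuns (rest.dropWhile p)
        = K'.map (fun te => (te, (rest.dropWhile p).filter (fun r => r.1 == te))) :=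
      ih K' ((List.pairwise_cons.1 hK).2)
        (((List.pairwise_cons.1 hs).2).sublist (List.dropWhile_sublist p)) hmem'
    have hfil : (q :: rest).filter (fun r => r.1 == q.1) = q :: rest.takeWhile p := by
      have h1 : (rest.takeWhile p).filter (fun r => r.1 == q.1) = rest.takeWhile p :=
        List.filter_eq_self.2 (fun x hx => by simp [htake x hx])
      have h2 : (rest.dropWhile p).filter (fun r => r.1 == q.1) = [] :=
        List.filter_eq_nil_iff.2 (fun x hx => by simp [ne_of_gt (hdrop x hx)])
      rw [List.filter_cons_of_pos (by simp)]
      conv_lhs => rw [hsplit]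
      rw [List.filter_append, h1, h2, List.append_nil]
    rw [pvGroupRuns_cons, ihK, List.map_cons, hfil]
    congr 1
    apply List.map_congr_left
    intro te hte
    have hteg : q.1 < te := (List.pairwise_cons.1 hK).1 te hte
    have hstep : (q :: rest).filter (fun r => r.1 == te) = (rest.dropWhile p).filter (fun r => r.1 == te) := by
      have h1 : (rest.takeWhile p).filter (fun r => r.1 == te) = [] :=
        List.filter_eq_nil_iff.2 (fun x hx => by simp only [htake x hx, beq_iff_eq]; exact ne_of_lt hteg)
      rw [List.filter_cons_of_neg (by simp only [beq_iff_eq]; exact ne_of_lt hteg)]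
      conv_lhs => rw [hsplit]
      rw [List.filter_append, h1, List.nil_append]
    rw [hstep]

theorem pv_sorted_pairwise_lt (L : List PVQuad) (hN : L.Nodup) :
    (PySem.List.sorted L pvKey4).Pairwise (fun a b => pvKey4 a < pvKey4 b) := by
  have hle := PySem.List.sorted_pairwise L pvKey4
  have hnd : (PySem.List.sorted L pvKey4).Nodup := (PySem.List.sorted_perm L pvKey4 false).nodup_iff.2 hN
  have := hle.and hnd
  exact this.imp (fun h => lt_of_le_of_ne h.1 (fun he => h.2 (pvKey4_injective he)))

theorem pv_sorted_pairwise_lt3 (L : List PVTrip) (hN : L.Nodup) :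
    (PySem.List.sorted L pvKey3).Pairwise (fun a b => pvKey3 a < pvKey3 b) := by
  have hle := PySem.List.sorted_pairwise L pvKey3
  have hnd : (PySem.List.sorted L pvKey3).Nodup := (PySem.List.sorted_perm L pvKey3 false).nodup_iff.2 hN
  have := hle.and hnd
  exact this.imp (fun h => lt_of_le_of_ne h.1 (fun he => h.2 (pvKey3_injective he)))

theorem pv_filter_sorted (L : List PVQuad) (hN : L.Nodup) (te : List Int) :
    (PySem.List.sorted L pvKey4).filter (fun r => r.1 == te)
      = (PySem.List.sorted ((L.filter (fun r => r.1 == te)).map (·.2)) pvKey3).map (fun t => (te, t)) := by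
  set tt := PySem.List.sorted L pvKey4 with htt
  set flt := tt.filter (fun r => r.1 == te) with hflt
  have hmem_te : ∀ r ∈ flt, r.1 = te := by
    intro r hr
    have := List.of_mem_filter hr
    simpa using this
  have hlt : flt.Pairwise (fun a b => pvKey4 a < pvKey4 b) :=
    (pv_sorted_pairwise_lt L hN).sublist List.filter_sublist
  have hsorted : PySem.List.sorted ((L.filter (fun r => r.1 == te)).map (·.2)) pvKey3 = flt.map (·.2) := by
    apply PySem.List.sorted_eq_of_perm_of_pairwise_lt
    · exact (((PySem.List.sorted_perm L pvKey4 false).filter _).map _)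
    · apply List.pairwise_map.2
      apply hlt.imp_of_mem
      intro a b ha hb hab
      have ha1 : a = (te, a.2) := Prod.ext (hmem_te a ha) rfl
      have hb1 : b = (te, b.2) := Prod.ext (hmem_te b hb) rfl
      apply pvKey4_lt_key3
      rw [← ha1, ← hb1]
      exact hab
  rw [hsorted, List.map_map]
  have hid : flt.map (fun r => ((te, r.2) : PVQuad)) = flt := by
    conv_rhs => rw [← List.map_id flt]
    exact List.map_congr_left (fun r hr => Prod.ext (hmem_te r hr).symm rfl)
  exact hid.symm

-- the two LT/DecidableLT instance paths on List ℤ sort identically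
theorem pv_sortKeys_eq (xs : List (List ℤ)) :
    @PySem.List.sorted (List ℤ) (List ℤ) List.instLT (fun a b => a.decidableLT b) xs (fun k => k) false
      = @PySem.List.sorted (List ℤ) (List ℤ) List.instLinearOrder.toLT LinearOrder.toDecidableLT
          xs (fun k => k) false := by
  rw [PySem.List.sorted_eq_foldl_insertBy,
    @PySem.List.sorted_eq_foldl_insertBy (List ℤ) (List ℤ) List.instLinearOrder.toLT
      LinearOrder.toDecidableLT xs (fun k => k)]
  congr 1
  funext acc x
  congr 1
  funext a b
  exact decide_eq_decide.2 Iff.rfl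

theorem pv_main (L : List PVQuad) (hN : L.Nodup) :
    pvGroupRuns (PySem.List.sorted L pvKey4)
      = (@PySem.List.sorted (List ℤ) (List ℤ) List.instLinearOrder.toLT LinearOrder.toDecidableLT
            (PySem.Set.ofList (L.map (·.1))) (fun k => k) false).map
          (fun te => (te, (PySem.List.sorted ((L.filter (fun r => r.1 == te)).map (·.2)) pvKey3).map (fun t => (te, t)))) := by
  set tt := PySem.List.sorted L pvKey4 with htt
  set K := @PySem.List.sorted (List ℤ) (List ℤ) List.instLinearOrder.toLT LinearOrder.toDecidableLT
      (PySem.Set.ofList (L.map (·.1))) (fun k => k) false with hKdef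
  have hfst : tt.Pairwise (fun a b => a.1 ≤ b.1) :=
    (pv_sorted_pairwise_lt L hN).imp (fun h => pvKey4_lt_fst_le h)
  have hKlt : K.Pairwise (· < ·) := by rw [hKdef]; exact PySem.List.sorted_ofList_pairwise_lt (L.map (·.1))
  have hKperm : K.Perm (PySem.Set.ofList (L.map (·.1))) := by
    rw [hKdef]
    exact @PySem.List.sorted_perm (List ℤ) (List ℤ) List.instLinearOrder.toLT LinearOrder.toDecidableLT _ _ false
  have httperm : tt.Perm L := by rw [htt]; exact PySem.List.sorted_perm _ _ false
  have hKmem : ∀ k, k ∈ K ↔ k ∈ tt.map (·.1) := by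
    intro k
    rw [hKperm.mem_iff, PySem.Set.mem_ofList]
    constructor
    · intro hk
      rcases List.mem_map.1 hk with ⟨x, hx, rfl⟩
      exact List.mem_map_of_mem (httperm.mem_iff.2 hx)
    · intro hk
      rcases List.mem_map.1 hk with ⟨x, hx, rfl⟩
      exact List.mem_map_of_mem (httperm.mem_iff.1 hx)
  rw [pvGroupRuns_eq K tt hKlt hfst hKmem]
  apply List.map_congr_left
  intro te _
  rw [pv_filter_sorted L hN te]

-- pv_main restated with the instance path and term shapes the ports elaborate to
theorem pv_main' (L : List PVQuad) (hN : L.Nodup) :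
    pvGroupRuns (PySem.List.sorted L pvKey4)
      = (@PySem.List.sorted (List ℤ) (List ℤ) List.instLT (fun a b => a.decidableLT b)
            (PySem.Set.ofList (L.map Prod.fst)) (fun k => k) false).map
          (fun te => (te, (PySem.List.sorted ((L.filter (fun p => p.1 == te)).map (fun x => x.2)) pvKey3).map
            (fun t => (te, t)))) := by
  rw [pv_sortKeys_eq]
  exact pv_main L hN

-- the filtered, te-stripped group list is duplicate-free when the quadruple list is
theorem pv_group_nodup (L : List PVQuad) (hN : L.Nodup) (te : List Int) :
    ((L.filter (fun q => q.1 == te)).map (fun q => q.2)).Nodup := by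
  apply (hN.filter _).map_on
  intro x hx y hy hxy
  have hx1 : x.1 = te := by simpa using List.of_mem_filter hx
  have hy1 : y.1 = te := by simpa using List.of_mem_filter hy
  exact Prod.ext (hx1.trans hy1.symm) hxy

-- pvSumDe and pvLow are invariant under permutation of the group list
theorem pvSumDe_perm {g g' : List PVTrip} (h : g.Perm g') : pvSumDe g = pvSumDe g' :=
  (h.map _).sum_eq

theorem pvLow_perm {g g' : List PVTrip} (h : g.Perm g') (t : PVTrip) : pvLow g t = pvLow g' t :=
  pvSumDe_perm (h.filter _)

-- A's running-offset inner loop equals B's closed-form-offset inner loop: on a strictly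
-- increasing list s, the accumulator at t is c plus the sum of De over the prefix < t.
theorem pv_inner (g : List PVTrip) (s : List PVTrip)
    (hs : s.Pairwise (fun a b => pvKey3 a < pvKey3 b))
    (d0 : PySem.Dict (List Int) ((Int × Int) × Int × Int)) (c : Int)
    (H : ∀ t ∈ s, pvLow g t = c + pvLow s t) :
    s.foldl (fun (st : PySem.Dict (List Int) ((Int × Int) × Int × Int) × Int) t =>
        (st.1.insert t.1 ((st.2, st.2 + t.2.1), t.2.1, t.2.2), st.2 + t.2.1)) (d0, c)
      = (s.foldl (fun d t => d.insert t.1 ((pvLow g t, pvLow g t + t.2.1), t.2.1, t.2.2)) d0,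
         c + pvSumDe s) := by
  induction s generalizing d0 c with
  | nil => simp [pvSumDe]
  | cons t s' ih =>
    have hlt : ∀ u ∈ s', pvKey3 t < pvKey3 u := (List.pairwise_cons.1 hs).1
    have hself : pvLow (t :: s') t = 0 := by
      have : (t :: s').filter (fun u => decide (pvKey3 u < pvKey3 t)) = [] := by
        apply List.filter_eq_nil_iff.2
        intro u hu
        rcases List.mem_cons.1 hu with rfl | hu'
        · simp
        · simp [not_lt_of_gt (hlt u hu')]
      simp [pvLow, this, pvSumDe]
    have hgt : pvLow g t = c := by
      have := H t (List.mem_cons_self ..)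
      rw [hself] at this; omega
    have H' : ∀ u ∈ s', pvLow g u = (c + t.2.1) + pvLow s' u := by
      intro u hu
      have hcons : pvLow (t :: s') u = t.2.1 + pvLow s' u := by
        unfold pvLow
        rw [List.filter_cons_of_pos (by simp [hlt u hu])]
        simp [pvSumDe]
      have h2 := H u (List.mem_cons_of_mem _ hu)
      rw [hcons] at h2
      omega
    simp only [List.foldl_cons, hgt]
    rw [ih ((List.pairwise_cons.1 hs).2) _ _ H']
    simp only [pvSumDe, List.map_cons, List.sum_cons, add_assoc]

-- ===== VERDICT (by name: the statement is the Claim_ definition above) =====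
theorem leg_structure_merge_py_spec : Claim_equal_leg_structure_merge_py := by
  intro teff tlegs Deff Dlegs _
  unfold Spec_leg_structure_merge_py
  set L := PySem.Set.ofList (teff.zip (tlegs.zip (Deff.zip Dlegs))) with hL
  have hN : L.Nodup := PySem.Set.nodup_ofList _
  simp only [leg_structure_merge_py, leg_structure_merge_py_alt, ← hL]
  rw [pv_main' _ hN, List.foldl_map]
  refine congrArg (fun z : PySem.Dict (List Int) (List (List Int × (Int × Int) × Int × Int)) × PySem.Dict (List Int) Int => (z.1.items, z.2.items)) ?_
  congr 1
  funext acc te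
  dsimp only
  have hgnd := pv_group_nodup L hN te
  have hset : PySem.Set.ofList ((L.filter (fun q => q.1 == te)).map (fun q => q.2))
      = (L.filter (fun q => q.1 == te)).map (fun q => q.2) :=
    PySem.Set.ofList_eq_self_of_nodup _ hgnd
  rw [hset]
  set gl := (L.filter (fun q => q.1 == te)).map (fun q => q.2) with hgl
  set s := PySem.List.sorted gl pvKey3 with hsrt
  have hperm : gl.Perm s := (PySem.List.sorted_perm gl pvKey3 false).symm
  have hsp : s.Pairwise (fun a b => pvKey3 a < pvKey3 b) := pv_sorted_pairwise_lt3 gl hgnd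
  have H : ∀ t ∈ s, pvLow gl t = 0 + pvLow s t := by
    intro t _
    rw [pvLow_perm hperm t]; omega
  have hinner := pv_inner gl s hsp PySem.Dict.empty 0 H
  rw [List.foldl_map]
  dsimp only
  rw [hinner, pvSumDe_perm hperm, zero_add]
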